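-- pv_equiv track=rewrite | github.com/byronichero/marlowe | app/services/nist_oscal_service.py | _oscal_id_to_identifier
-- ===== SOURCE A (Python) =====
-- def _oscal_id_to_identifier(oscal_id: str) -> str:
--     """
--     Convert OSCAL control ID to display format.
--     ac-1 -> AC-1, ac-2.1 -> AC-2(1), ac-2.13 -> AC-2(13)
--     """
--     if not oscal_id or "." not in oscal_id:
--         # Base control: ac-1 -> AC-1
--         parts = oscal_id.split("-", 1)
--         if len(parts) == 2:
--             family, num = parts
--             return f"{family.upper()}-{num}"
--         return oscal_id.upper() if oscal_id else ""
--     # Enhancement: ac-2.1 -> AC-2(1)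
--     base, enh = oscal_id.rsplit(".", 1)
--     ident = _oscal_id_to_identifier(base)
--     # AC-2 -> AC-2(1)
--     return f"{ident}({enh})"
-- ===== SOURCE B (Python) =====
-- def _oscal_id_to_identifier(oscal_id: str) -> str:
--     """
--     Convert OSCAL control ID to display format.
--     ac-1 -> AC-1, ac-2.1 -> AC-2(1), ac-2.13 -> AC-2(13)
--     """
--     parts = oscal_id.split(".")
--     base = parts[0]
--     family, sep, num = base.partition("-")
--     ident = f"{family.upper()}-{num}" if sep else base.upper()
--     for enh in parts[1:]:
--         ident = f"{ident}({enh})"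
--     return ident
-- ===== Notes on version B (the rewrite author's own statement) =====
-- stated objective: simpler
-- what changed: A recurses right-to-left, peeling off the last dot-separated enhancement each time; B splits the id on dots once, computes the base identifier with a single dash partition, and wraps the enhancement parts in one left-to-right fold.
import Mathlib
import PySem

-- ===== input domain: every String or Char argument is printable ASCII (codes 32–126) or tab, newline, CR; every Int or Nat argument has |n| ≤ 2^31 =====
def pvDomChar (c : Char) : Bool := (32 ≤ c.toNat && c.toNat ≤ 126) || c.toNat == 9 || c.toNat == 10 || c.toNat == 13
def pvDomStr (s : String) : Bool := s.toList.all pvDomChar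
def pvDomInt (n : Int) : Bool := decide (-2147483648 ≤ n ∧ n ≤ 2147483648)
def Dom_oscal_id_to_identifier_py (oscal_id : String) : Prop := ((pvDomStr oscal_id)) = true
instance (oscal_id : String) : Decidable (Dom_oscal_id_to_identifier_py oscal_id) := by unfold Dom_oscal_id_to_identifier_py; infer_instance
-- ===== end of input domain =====

-- B replaces A's right-to-left recursion on rsplit('.', 1) by a single split('.') followed by one
-- left-to-right fold over the enhancement parts (objective: simpler, no recursion; same cost).


-- ===== PORT A =====
-- hand port of s.split(c, 1) for a one-character separator: exact (first occurrence, at most one split)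
def pvSplit1 (s : List Char) (c : Char) : Option (List Char × List Char) :=
  match s with
  | [] => none
  | x :: xs =>
    if x = c then some ([], xs)
    else match pvSplit1 xs c with
         | some (b, e) => some (x :: b, e)
         | none => none

-- hand port of s.rsplit(c, 1) for a one-character separator: exact (last occurrence; none iff c absent)
def pvRsplit1 (s : List Char) (c : Char) : Option (List Char × List Char) :=
  match s with
  | [] => none
  | x :: xs =>
    match pvRsplit1 xs c with
    | some (b, e) => some (x :: b, e)
    | none => if x = c then some ([], xs) else none

theorem pvRsplit1_some_length {s b e : List Char} {c : Char}
    (h : pvRsplit1 s c = some (b, e)) : b.length < s.length := by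
  induction s generalizing b e with
  | nil => simp [pvRsplit1] at h
  | cons x xs ih =>
    simp only [pvRsplit1] at h
    cases hx : pvRsplit1 xs c with
    | some p =>
      obtain ⟨b', e'⟩ := p
      rw [hx] at h
      simp only [Option.some.injEq, Prod.mk.injEq] at h
      obtain ⟨hb, _⟩ := h
      subst hb
      simpa using Nat.succ_lt_succ (ih hx)
    | none =>
      rw [hx] at h
      split_ifs at h with hc
      · simp only [Option.some.injEq, Prod.mk.injEq] at h
        obtain ⟨hb, _⟩ := h
        subst hb; simp

-- transliteration of A: base branch on '' / no dot, else recursion on rsplit('.', 1)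
def oscalA (s : List Char) : List Char :=
  if s = [] ∨ PySem.Chars.isIn ['.'] s = false then
    match pvSplit1 s '-' with
    | some (family, num) => PySem.Chars.upper family ++ '-' :: num
    | none => if s = [] then [] else PySem.Chars.upper s
  else
    match h : pvRsplit1 s '.' with
    | some (base, enh) => oscalA base ++ '(' :: (enh ++ [')'])
    | none => []      -- unreachable: '.' occurs in s
termination_by s.length
decreasing_by exact pvRsplit1_some_length h

def oscal_id_to_identifier_py (oscal_id : String) : String :=
  String.mk (oscalA oscal_id.toList)

-- ===== PORT B =====
-- hand port of s.split(c) for a one-character separator: exact (Python split never returns [])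
def pvSplitAll (s : List Char) (c : Char) : List (List Char) :=
  match s with
  | [] => [[]]
  | x :: xs =>
    if x = c then [] :: pvSplitAll xs c
    else match pvSplitAll xs c with
         | p :: ps => (x :: p) :: ps
         | [] => [[x]]        -- unreachable: pvSplitAll never returns []

-- transliteration of B: split once on '.', handle parts[0] via partition('-'), fold over parts[1:]
def oscalB (s : List Char) : List Char :=
  let parts := pvSplitAll s '.'
  let base := parts.headI                     -- parts[0]; exact, parts is never empty
  let (family, rest) := base.span (fun ch => ch ≠ '-')   -- base.partition('-'): rest = sep ++ num
  let ident := match rest with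
    | [] => PySem.Chars.upper base
    | _ :: num => PySem.Chars.upper family ++ '-' :: num
  parts.tail.foldl (fun id enh => id ++ '(' :: (enh ++ [')'])) ident

def oscal_id_to_identifier_py_alt (oscal_id : String) : String :=
  String.mk (oscalB oscal_id.toList)

-- ===== PRECONDITION & SPEC =====
def Spec_oscal_id_to_identifier_py (oscal_id : String) (out : String) : Prop := out = oscal_id_to_identifier_py_alt oscal_id
instance (oscal_id : String) (out : String) : Decidable (Spec_oscal_id_to_identifier_py oscal_id out) := by unfold Spec_oscal_id_to_identifier_py; infer_instance

-- ===== CLAIM (what is proved, stated in full; the proofs are below) =====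
def Claim_equal_oscal_id_to_identifier_py : Prop := ∀ (oscal_id : String), Dom_oscal_id_to_identifier_py oscal_id → Spec_oscal_id_to_identifier_py oscal_id (oscal_id_to_identifier_py oscal_id)

-- ===== LEMMAS AND PROOFS =====

theorem pvIsIn_single_iff (s : List Char) (c : Char) :
    PySem.Chars.isIn [c] s = true ↔ c ∈ s := by
  rw [PySem.Chars.isIn_iff_infix]
  constructor
  · intro h; exact h.mem (by simp)
  · intro h
    obtain ⟨l, r, rfl⟩ := List.append_of_mem h
    exact ⟨l, r, by simp⟩

theorem pvRsplit1_eq_none_iff (s : List Char) (c : Char) :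
    pvRsplit1 s c = none ↔ c ∉ s := by
  induction s with
  | nil => simp [pvRsplit1]
  | cons x xs ih =>
    simp only [pvRsplit1, List.mem_cons]
    cases hx : pvRsplit1 xs c with
    | some p => simp [← ih, hx]
    | none =>
      rw [hx] at ih
      have hxs : c ∉ xs := ih.mp rfl
      split_ifs with hc
      · constructor
        · intro hfalse; exact absurd hfalse (by simp)
        · intro hno; exact absurd (Or.inl hc.symm) hno
      · constructor
        · intro _
          rintro (rfl | hm)
          · exact hc rfl
          · exact hxs hm
        · intro _; rfl

theorem pvSplit1_eq_none_iff (s : List Char) (c : Char) :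
    pvSplit1 s c = none ↔ c ∉ s := by
  induction s with
  | nil => simp [pvSplit1]
  | cons x xs ih =>
    simp only [pvSplit1, List.mem_cons]
    by_cases hc : x = c
    · simp only [if_pos hc]
      constructor
      · intro hfalse; exact absurd hfalse (by simp)
      · intro hno; exact absurd (Or.inl hc.symm) hno
    · simp only [if_neg hc]
      cases hx : pvSplit1 xs c with
      | some p =>
        rw [hx] at ih
        constructor
        · intro hfalse; exact absurd hfalse (by simp)
        · intro hno
          exact absurd (fun hm => hno (Or.inr hm)) (by simpa using ih)
      | none =>
        rw [hx] at ih
        have hxs : c ∉ xs := ih.mp rfl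
        constructor
        · intro _
          rintro (rfl | hm)
          · exact hc rfl
          · exact hxs hm
        · intro _; rfl

theorem pvSplitAll_ne_nil (s : List Char) (c : Char) : pvSplitAll s c ≠ [] := by
  cases s with
  | nil => simp [pvSplitAll]
  | cons x xs =>
    simp only [pvSplitAll]
    split_ifs
    · simp
    · cases pvSplitAll xs c <;> simp

theorem pvSplitAll_of_not_mem {s : List Char} {c : Char} (h : c ∉ s) :
    pvSplitAll s c = [s] := by
  induction s with
  | nil => simp [pvSplitAll]
  | cons x xs ih =>
    simp only [List.mem_cons, not_or] at h
    have hxc : ¬ x = c := fun h2 => h.1 h2.symm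
    simp [pvSplitAll, hxc, ih h.2]

theorem pvSplitAll_rsplit {s b e : List Char} {c : Char}
    (h : pvRsplit1 s c = some (b, e)) :
    pvSplitAll s c = pvSplitAll b c ++ [e] := by
  induction s generalizing b e with
  | nil => simp [pvRsplit1] at h
  | cons x xs ih =>
    simp only [pvRsplit1] at h
    cases hx : pvRsplit1 xs c with
    | some p =>
      obtain ⟨b2, e2⟩ := p
      rw [hx] at h
      simp only [Option.some.injEq, Prod.mk.injEq] at h
      obtain ⟨hb, he⟩ := h
      subst hb; subst he
      by_cases hc : x = c
      · subst hc
        simp only [pvSplitAll, if_pos rfl, ih hx]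
        simp
      · have hbne := pvSplitAll_ne_nil b2 c
        simp only [pvSplitAll, if_neg hc, ih hx]
        cases hsb : pvSplitAll b2 c with
        | nil => exact absurd hsb hbne
        | cons p ps => simp
    | none =>
      rw [hx] at h
      split_ifs at h with hc
      · simp only [Option.some.injEq, Prod.mk.injEq] at h
        obtain ⟨hb, he⟩ := h
        have hxs : c ∉ xs := (pvRsplit1_eq_none_iff xs c).mp hx
        subst hb; subst he; subst hc
        simp [pvSplitAll, pvSplitAll_of_not_mem hxs]

theorem pvSpan_of_none {s : List Char} {c : Char} (h : c ∉ s) :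
    s.span (fun ch => ch ≠ c) = (s, []) := by
  rw [List.span_eq_takeWhile_dropWhile]
  have h1 : s.takeWhile (fun ch => decide (ch ≠ c)) = s :=
    List.takeWhile_eq_self_iff.mpr (by
      intro y hy
      simp only [decide_eq_true_iff]
      intro hyc; exact h (hyc ▸ hy))
  have h2 : s.dropWhile (fun ch => decide (ch ≠ c)) = [] :=
    List.dropWhile_eq_nil_iff.mpr (by
      intro y hy
      simp only [decide_eq_true_iff]
      intro hyc; exact h (hyc ▸ hy))
  rw [h1, h2]

theorem pvSpan_of_split1 {s b e : List Char} {c : Char}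
    (h : pvSplit1 s c = some (b, e)) :
    s.span (fun ch => ch ≠ c) = (b, c :: e) := by
  induction s generalizing b e with
  | nil => simp [pvSplit1] at h
  | cons x xs ih =>
    simp only [pvSplit1] at h
    by_cases hc : x = c
    · rw [if_pos hc] at h
      simp only [Option.some.injEq, Prod.mk.injEq] at h
      obtain ⟨hb, he⟩ := h
      subst hb; subst he; subst hc
      simp [List.span_eq_takeWhile_dropWhile, List.takeWhile_cons, List.dropWhile_cons]
    · rw [if_neg hc] at h
      cases hx : pvSplit1 xs c with
      | some p =>
        obtain ⟨b2, e2⟩ := p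
        rw [hx] at h
        simp only [Option.some.injEq, Prod.mk.injEq] at h
        obtain ⟨hb, he⟩ := h
        subst hb; subst he
        have hxs := ih hx
        rw [List.span_eq_takeWhile_dropWhile] at hxs ⊢
        simp only [Prod.mk.injEq] at hxs
        obtain ⟨h1, h2⟩ := hxs
        simp only [Prod.mk.injEq]
        refine ⟨?_, ?_⟩
        · rw [List.takeWhile_cons_of_pos (by simp [hc]), h1]
        · rw [List.dropWhile_cons_of_pos (by simp [hc]), h2]
      | none => rw [hx] at h; simp at h

-- the base-control identifier computed from pvSplit1 agrees with B's span/partition form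
theorem pvBase_eq (s : List Char) :
    (match pvSplit1 s '-' with
     | some (family, num) => PySem.Chars.upper family ++ '-' :: num
     | none => if s = [] then [] else PySem.Chars.upper s) =
    (match (s.span (fun ch => ch ≠ '-')).2 with
     | [] => PySem.Chars.upper s
     | _ :: num => PySem.Chars.upper (s.span (fun ch => ch ≠ '-')).1 ++ '-' :: num) := by
  cases hx : pvSplit1 s '-' with
  | none =>
    have hnm : '-' ∉ s := (pvSplit1_eq_none_iff s '-').mp hx
    rw [pvSpan_of_none hnm]
    by_cases hs : s = []
    · subst hs; simp [PySem.Chars.upper]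
    · simp [hs]
  | some p =>
    obtain ⟨b, e⟩ := p
    rw [pvSpan_of_split1 hx]

theorem oscal_core_eq (s : List Char) : oscalA s = oscalB s := by
  induction hn : s.length using Nat.strong_induction_on generalizing s with
  | _ n ih =>
  subst hn
  by_cases hbase : s = [] ∨ PySem.Chars.isIn ['.'] s = false
  · -- base control: no '.' in s (or s empty)
    have hnm : '.' ∉ s := by
      rcases hbase with rfl | hni
      · simp
      · intro hmem
        have hmem2 := (pvIsIn_single_iff s '.').mpr hmem
        rw [hni] at hmem2
        exact absurd hmem2 (by simp)
    rw [oscalA, if_pos hbase]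
    unfold oscalB
    rw [pvSplitAll_of_not_mem hnm]
    simpa using pvBase_eq s
  · have hne : s ≠ [] := fun h => hbase (Or.inl h)
    have hin2 : '.' ∈ s := by
      apply (pvIsIn_single_iff s '.').mp
      cases h : PySem.Chars.isIn ['.'] s with
      | false => exact absurd (Or.inr h) hbase
      | true => rfl
    have hsome : pvRsplit1 s '.' ≠ none := fun h => (pvRsplit1_eq_none_iff s '.').mp h hin2
    rw [oscalA, if_neg hbase]
    split
    next b e h =>
      have hIH : oscalA b = oscalB b :=
        ih b.length (pvRsplit1_some_length h) b rfl
      rw [hIH]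
      have hbn := pvSplitAll_ne_nil b '.'
      cases hsb : pvSplitAll b '.' with
      | nil => exact absurd hsb hbn
      | cons p ps =>
        simp only [oscalB, pvSplitAll_rsplit h, hsb]
        simp [List.foldl_append]
    next h => exact absurd h hsome

-- ===== VERDICT (by name: the statement is the Claim_ definition above) =====
theorem oscal_id_to_identifier_py_spec : Claim_equal_oscal_id_to_identifier_py := by
  intro s hd
  unfold Spec_oscal_id_to_identifier_py oscal_id_to_identifier_py oscal_id_to_identifier_py_alt
  rw [oscal_core_eq]
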